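-- pv_equiv track=rewrite | github.com/wyk18703232953/myResearch | codeComplex/data copy/filteredData/python/np/python_np_0235.py | diferencia
-- ===== SOURCE A (Python) =====
-- def diferencia(s1, d):
--     if s1:
--         s1.sort()
--         if s1[-1] - s1[0] >= d:
--             return s1
--         else:
--             s1.pop()
--             return diferencia(s1, d)
--     return s1
-- ===== SOURCE B (Python) =====
-- def diferencia(s1, d):
--     # Closed form: A's pops never change the min, so either the full sorted
--     # list already has range >= d, or nothing does and the list empties.
--     # Mutates s1 in place like A (sorts it; empties it when range < d).
--     s1.sort()
--     if s1 and s1[-1] - s1[0] < d: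
--         s1.clear()
--     return s1
-- ===== Notes on version B (the rewrite author's own statement) =====
-- stated objective: faster
-- what changed: A recursively re-sorts and pops the maximum one element at a time; B sorts once and uses the closed form (popping never changes the minimum, so either the full sorted list already has range >= d or no suffix-trimmed prefix ever will): return sorted(s1) if range >= d else [].
import Mathlib
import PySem

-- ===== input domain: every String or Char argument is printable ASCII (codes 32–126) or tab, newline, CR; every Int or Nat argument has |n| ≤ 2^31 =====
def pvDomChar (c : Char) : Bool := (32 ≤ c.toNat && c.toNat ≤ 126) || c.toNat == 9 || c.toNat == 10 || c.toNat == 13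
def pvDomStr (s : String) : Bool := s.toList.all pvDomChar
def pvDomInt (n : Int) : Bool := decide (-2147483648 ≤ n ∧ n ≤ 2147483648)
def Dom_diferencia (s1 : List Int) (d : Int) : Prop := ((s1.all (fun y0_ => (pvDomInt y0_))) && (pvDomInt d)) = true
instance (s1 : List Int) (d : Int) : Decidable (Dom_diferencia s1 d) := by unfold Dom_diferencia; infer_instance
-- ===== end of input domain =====

-- B sorts once and returns the closed form instead of A's re-sort-and-pop recursion (faster, asymptotic).
-- Both Pythons mutate s1 in place the same way; the theorem is about the return value.

-- ===== PORT A =====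
-- s1.pop() removes the last element: ported exactly as dropLast.
-- s1[-1] / s1[0] are in the nonempty branch, so pyGet? is some; .getD 0 is exact there.
def diferencia (s1 : List Int) (d : Int) : List Int :=
  if h : s1 = [] then s1
  else
    let s := PySem.List.sorted s1 (fun x => x) false
    if (PySem.List.pyGet? s (-1)).getD 0 - (PySem.List.pyGet? s 0).getD 0 ≥ d then s
    else diferencia s.dropLast d
termination_by s1.length
decreasing_by
  have hl : (PySem.List.sorted s1 (fun x : Int => x) false).length = s1.length :=
    PySem.List.length_sorted ..
  have : s1.length ≠ 0 := fun hz => h (List.eq_nil_of_length_eq_zero hz)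
  simp [List.length_dropLast, hl]; omega

-- ===== PORT B =====
def diferencia_alt (s1 : List Int) (d : Int) : List Int :=
  let s := PySem.List.sorted s1 (fun x => x) false
  if s ≠ [] ∧ (PySem.List.pyGet? s (-1)).getD 0 - (PySem.List.pyGet? s 0).getD 0 < d then
    []
  else s

-- ===== PRECONDITION & SPEC =====
def Spec_diferencia (s1 : List Int) (d : Int) (out : List Int) : Prop := out = diferencia_alt s1 d
instance (s1 : List Int) (d : Int) (out : List Int) : Decidable (Spec_diferencia s1 d out) := by unfold Spec_diferencia; infer_instance

-- ===== CLAIM (what is proved, stated in full; the proofs are below) =====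
def Claim_equal_diferencia : Prop := ∀ (s1 : List Int) (d : Int), Dom_diferencia s1 d → Spec_diferencia s1 d (diferencia s1 d)

-- ===== LEMMAS AND PROOFS =====

theorem pv_pairwise_dropLast {l : List Int} (h : l.Pairwise (· ≤ ·)) :
    l.dropLast.Pairwise (· ≤ ·) :=
  h.sublist (List.dropLast_sublist l)

-- A on an already ≤-sorted list in which every pairwise difference is < d returns []
theorem pv_A_small_nil (d : Int) : ∀ (s : List Int), s.Pairwise (· ≤ ·) →
    (∀ x ∈ s, ∀ y ∈ s, x - y < d) → diferencia s d = [] := by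
  intro s
  induction hn : s.length using Nat.strong_induction_on generalizing s with
  | _ n ih =>
    intro hpw hsmall
    rw [diferencia]
    by_cases hnil : s = []
    · simp [hnil]
    · have hsort : PySem.List.sorted s (fun x : Int => x) false = s := by
        apply PySem.List.sorted_eq_self_of_pairwise
        simpa using hpw
      have hcond : (PySem.List.pyGet? s (-1)).getD 0 - (PySem.List.pyGet? s 0).getD 0 < d := by
        have hlt : 0 < s.length := List.length_pos_iff.mpr hnil
        have hd := hsmall _ (List.getLast_mem hnil) _ (List.head_mem hnil)
        rw [PySem.List.pyGet?_neg_one, PySem.List.pyGet?_zero,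
          List.getLast?_eq_some_getLast hnil, List.getElem?_eq_getElem hlt]
        simpa [List.getElem_zero_eq_head] using hd
      simp only [hnil, dite_false, hsort]
      rw [if_neg (by omega)]
      have hlen : s.dropLast.length < n := by
        rw [List.length_dropLast]
        have : s.length ≠ 0 := fun hz => hnil (List.eq_nil_of_length_eq_zero hz)
        omega
      exact ih _ hlen _ rfl (pv_pairwise_dropLast hpw)
        (fun x hx y hy => hsmall x ((List.dropLast_sublist s).subset hx)
                                 y ((List.dropLast_sublist s).subset hy))

theorem pv_main (s1 : List Int) (d : Int) : diferencia s1 d = diferencia_alt s1 d := by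
  rw [diferencia, diferencia_alt]
  by_cases hnil : s1 = []
  · simp [hnil, PySem.List.sorted]
  · simp only [hnil, dite_false]
    set s := PySem.List.sorted s1 (fun x : Int => x) false with hs
    have hsne : s ≠ [] := by
      rw [hs, Ne, PySem.List.sorted_eq_nil_iff]; exact hnil
    have hpw : s.Pairwise (· ≤ ·) := by
      simpa using PySem.List.sorted_pairwise s1 (fun x : Int => x)
    by_cases hge : (PySem.List.pyGet? s (-1)).getD 0 - (PySem.List.pyGet? s 0).getD 0 ≥ d
    · rw [if_pos hge, if_neg (by simp [hsne]; omega)]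
    · rw [if_neg hge, if_pos ⟨hsne, by omega⟩]
      -- the recursive call trims to [] : every pairwise diff in s, hence in s.dropLast, is < d
      have hval : s.getLast hsne - s.head hsne < d := by
        have h1 : (PySem.List.pyGet? s (-1)).getD 0 = s.getLast hsne := by
          rw [PySem.List.pyGet?_neg_one, List.getLast?_eq_some_getLast hsne]; rfl
        have h2 : (PySem.List.pyGet? s 0).getD 0 = s.head hsne := by
          rw [PySem.List.pyGet?_zero,
            List.getElem?_eq_getElem (List.length_pos_iff.mpr hsne)]
          simp [List.getElem_zero_eq_head]
        rw [h1, h2] at hge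
        omega
      refine pv_A_small_nil d s.dropLast (pv_pairwise_dropLast hpw) ?_
      intro x hx y hy
      have hx' := (List.dropLast_sublist s).subset hx
      have hy' := (List.dropLast_sublist s).subset hy
      have h1 := hpw.rel_getLast hx'
      have h2 := hpw.rel_head hy'
      have h3 : s.getLast (List.ne_nil_of_mem hx') = s.getLast hsne := rfl
      have h4 : s.head (List.ne_nil_of_mem hy') = s.head hsne := rfl
      rw [h3] at h1; rw [h4] at h2; omega

-- ===== VERDICT (by name: the statement is the Claim_ definition above) =====
theorem diferencia_spec : Claim_equal_diferencia := by
  intro s1 d _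
  unfold Spec_diferencia
  exact pv_main s1 d
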